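-- pv_equiv track=rewrite | github.com/deckmasterbeam/CSE-231-Projects | Proj06/proj06.py | race_counter
-- ===== SOURCE A (Python) =====
-- def race_counter(list_local):
--     """
--     Function processes through the master list looking for instances of each
--     race through the catagory of race of the person executed
--     list_local: a master list of the race, gender, and victims of every
--     execution
--     white_count: a count of the number of white people executed
--     black_count: a count of the number of black people executed
--     hispanic_count: a count of the number of hispanic people executed
--     """
--     white_count, black_count, hispanic_count = 0,0,0
--     for line in list_local:
--         if line[0].lower() == "white":
--             white_count += 1
--             continue
--         elif line[0].lower() == "black":
--             black_count += 1
--             continue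
--         elif line[0].lower() == "hispanic":
--             hispanic_count += 1
--             continue
--     return white_count, black_count, hispanic_count
-- ===== SOURCE B (Python) =====
-- def race_counter(list_local):
--     """
--     Staged passes: first project each line to its lowercased first element,
--     then count each target race with list.count (three scans of the key list).
--     """
--     keys = [line[0].lower() for line in list_local]
--     return keys.count('white'), keys.count('black'), keys.count('hispanic')
-- ===== Notes on version B (the rewrite author's own statement) =====
-- stated objective: idiomatic
-- what changed: Replaces A's single pass with three scalar counters and per-line if/elif branching by staged passes: one map building the list of lowercased first elements, then three list.count scans, with no accumulator at all.
import Mathlib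
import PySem

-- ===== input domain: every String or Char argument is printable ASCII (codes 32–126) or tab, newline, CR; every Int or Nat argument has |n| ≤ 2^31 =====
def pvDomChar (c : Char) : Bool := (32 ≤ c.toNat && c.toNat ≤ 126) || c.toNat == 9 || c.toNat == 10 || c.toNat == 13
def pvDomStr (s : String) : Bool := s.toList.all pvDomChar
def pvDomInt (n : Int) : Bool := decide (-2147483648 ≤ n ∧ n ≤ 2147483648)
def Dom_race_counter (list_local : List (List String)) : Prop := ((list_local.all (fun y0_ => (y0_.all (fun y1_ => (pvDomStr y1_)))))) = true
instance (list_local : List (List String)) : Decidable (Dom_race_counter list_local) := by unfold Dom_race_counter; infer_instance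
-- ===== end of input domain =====

-- B replaces A's single accumulator pass with staged passes: a map to the
-- lowercased first elements, then three list.count scans (idiomatic; same value).


-- ===== PORT A =====
-- line[0] raises IndexError on an empty line; Pre_ excludes that, so .getD "" is never hit.
def race_counter (list_local : List (List String)) : Int × Int × Int :=
  list_local.foldl
    (fun (acc : Int × Int × Int) line =>
      let s := PySem.Str.lower ((PySem.List.pyGet? line 0).getD "")
      if s = "white" then (acc.1 + 1, acc.2.1, acc.2.2)
      else if s = "black" then (acc.1, acc.2.1 + 1, acc.2.2)
      else if s = "hispanic" then (acc.1, acc.2.1, acc.2.2 + 1)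
      else acc)
    (0, 0, 0)

-- ===== PORT B =====
def race_counter_alt (list_local : List (List String)) : Int × Int × Int :=
  let keys := list_local.map (fun line => PySem.Str.lower ((PySem.List.pyGet? line 0).getD ""))
  ((PySem.List.count keys "white" : Int), (PySem.List.count keys "black" : Int),
   (PySem.List.count keys "hispanic" : Int))

-- ===== PRECONDITION & SPEC =====
-- Pre_ excludes inputs containing an empty inner list, on which both Pythons raise IndexError at line[0].
def Pre_race_counter (list_local : List (List String)) : Prop :=
  ∀ line ∈ list_local, line ≠ []
instance (list_local : List (List String)) : Decidable (Pre_race_counter list_local) := by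
  unfold Pre_race_counter; infer_instance

def pvWitness_race_counter : List (List String) := [["White", "M"], ["black"], ["other"]]

def Spec_race_counter (list_local : List (List String)) (out : Int × Int × Int) : Prop := out = race_counter_alt list_local
instance (list_local : List (List String)) (out : Int × Int × Int) : Decidable (Spec_race_counter list_local out) := by unfold Spec_race_counter; infer_instance

-- ===== CLAIM (what is proved, stated in full; the proofs are below) =====
def Claim_equal_race_counter : Prop := ∀ (list_local : List (List String)), Dom_race_counter list_local → Pre_race_counter list_local → Spec_race_counter list_local (race_counter list_local)

-- ===== LEMMAS AND PROOFS =====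

-- Invariant: A's fold from (a,b,c) adds the counts of the three keys in the mapped list.
theorem race_counter_inv (l : List (List String)) (a b c : Int) :
    l.foldl
        (fun (acc : Int × Int × Int) line =>
          let s := PySem.Str.lower ((PySem.List.pyGet? line 0).getD "")
          if s = "white" then (acc.1 + 1, acc.2.1, acc.2.2)
          else if s = "black" then (acc.1, acc.2.1 + 1, acc.2.2)
          else if s = "hispanic" then (acc.1, acc.2.1, acc.2.2 + 1)
          else acc)
        (a, b, c)
    = (let keys := l.map (fun line => PySem.Str.lower ((PySem.List.pyGet? line 0).getD ""))
       (a + (PySem.List.count keys "white" : Int), b + (PySem.List.count keys "black" : Int),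
        c + (PySem.List.count keys "hispanic" : Int))) := by
  induction l generalizing a b c with
  | nil => simp [PySem.List.count]
  | cons line rest ih =>
      simp only [List.foldl_cons, List.map_cons]
      generalize PySem.Str.lower ((PySem.List.pyGet? line 0).getD "") = k
      by_cases hw : k = "white"
      · subst hw; rw [if_pos rfl, ih]
        simp [PySem.List.count]
        omega
      · rw [if_neg hw]
        by_cases hb : k = "black"
        · subst hb; rw [if_pos rfl, ih]
          simp [PySem.List.count, hw]
          omega
        · rw [if_neg hb]
          by_cases hh : k = "hispanic"
          · subst hh; rw [if_pos rfl, ih]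
            simp [PySem.List.count, hw, hb]
            omega
          · rw [if_neg hh, ih]
            simp [PySem.List.count, hw, hb, hh]

-- ===== VERDICT =====
theorem race_counter_spec : Claim_equal_race_counter := by
  intro l _ _
  unfold Spec_race_counter race_counter race_counter_alt
  rw [race_counter_inv]
  simp
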